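-- pv_equiv track=rewrite | github.com/jvboyle/Playground | KSTP/kstp-terraform/migration_projects/AP1/STAAS_Migration/python_scripts/parse_functions.py | filter_dfw
-- ===== SOURCE A (Python) =====
-- import copy
--
-- def filter_dfw(dfw):
--     DFW = copy.deepcopy(dfw)
--     for item in dfw:
--         for rule in dfw[item]["rules"]:
--             if not dfw[item]["rules"][rule]["apply"]:
--                 del DFW[item]["rules"][rule]
--         if not DFW[item]["rules"]:
--            del DFW[item]
--
--     return DFW
-- ===== SOURCE B (Python) =====
-- import copy
--
-- def filter_dfw(dfw):
--     result = {}
--     for name, item in dfw.items():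
--         kept = {r: copy.deepcopy(rd) for r, rd in item["rules"].items() if rd["apply"]}
--         if kept:
--             result[name] = {k: (kept if k == "rules" else copy.deepcopy(v)) for k, v in item.items()}
--     return result
-- ===== Notes on version B (the rewrite author's own statement) =====
-- stated objective: simpler
-- what changed: Instead of deep-copying the whole dict and deleting non-applying rules (and then emptied items) from the clone in place, B builds the result from scratch in one pass: for each item it keeps the rules whose 'apply' is truthy and emits the item (all keys preserved, filtered rules substituted) only when some rule survives.
import Mathlib
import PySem

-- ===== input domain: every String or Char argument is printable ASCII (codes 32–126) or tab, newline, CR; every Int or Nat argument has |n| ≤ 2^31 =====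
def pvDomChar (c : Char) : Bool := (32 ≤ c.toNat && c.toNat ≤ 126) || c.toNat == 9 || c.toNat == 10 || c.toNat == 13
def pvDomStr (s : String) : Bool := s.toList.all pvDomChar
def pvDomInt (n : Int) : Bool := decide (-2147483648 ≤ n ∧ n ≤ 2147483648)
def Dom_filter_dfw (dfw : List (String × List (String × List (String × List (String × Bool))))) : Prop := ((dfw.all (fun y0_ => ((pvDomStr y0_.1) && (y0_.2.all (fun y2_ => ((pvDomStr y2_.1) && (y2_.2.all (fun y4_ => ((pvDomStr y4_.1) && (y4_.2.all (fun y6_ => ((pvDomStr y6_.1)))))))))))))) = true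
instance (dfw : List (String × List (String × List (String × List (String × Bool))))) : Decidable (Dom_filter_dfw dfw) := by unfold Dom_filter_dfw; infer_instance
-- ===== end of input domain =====

-- B builds the filtered dict from scratch (keep rules whose "apply" is true, keep items with a
-- non-empty filtered rules dict) instead of deep-copying and deleting from the clone; objective: simpler.


-- ===== PORT A =====
-- Shared dict primitives on association lists (both Pythons use plain dict lookup / del / in-place update).
-- pyLookup? d k = d.get(k): first (= unique, under Pre_) match.
def pyLookup? {β : Type} (d : List (String × β)) (k : String) : Option β :=
  match d with
  | [] => none
  | (k', v) :: rest => if k' = k then some v else pyLookup? rest k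

-- del d[k]: removes the (unique, under Pre_) entry with key k.
def pyDelKey {β : Type} (d : List (String × β)) (k : String) : List (String × β) :=
  match d with
  | [] => []
  | (k', v) :: rest => if k' = k then rest else (k', v) :: pyDelKey rest k

-- in-place mutation of the value stored at key k (d[k] is mutated; other entries untouched).
def pyModKey {β : Type} (d : List (String × β)) (k : String) (f : β → β) : List (String × β) :=
  d.map (fun p => if p.1 = k then (p.1, f p.2) else p)

-- port of A: DFW = deepcopy(dfw); for item in dfw: delete non-apply rules from DFW[item]["rules"],
-- then delete DFW[item] if its rules dict became empty.
def filter_dfw (dfw : List (String × List (String × List (String × List (String × Bool))))) : List (String × List (String × List (String × List (String × Bool)))) :=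
  dfw.foldl (fun DFW itemP =>
    let item := itemP.1
    let itemVal := (pyLookup? dfw item).getD []          -- dfw[item]
    let rules := (pyLookup? itemVal "rules").getD []     -- dfw[item]["rules"]  (KeyError excluded by Pre_)
    let DFW1 := rules.foldl (fun D ruleP =>
      let rule := ruleP.1
      let ruleVal := (pyLookup? rules rule).getD []      -- dfw[item]["rules"][rule]
      if ((pyLookup? ruleVal "apply").getD false) = false -- not dfw[...]["apply"] (KeyError excluded by Pre_)
      then pyModKey D item (fun iv => pyModKey iv "rules" (fun r => pyDelKey r rule))  -- del DFW[item]["rules"][rule]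
      else D) DFW
    if ((pyLookup? ((pyLookup? DFW1 item).getD []) "rules").getD []) = []  -- if not DFW[item]["rules"]
    then pyDelKey DFW1 item                               -- del DFW[item]
    else DFW1) dfw

-- ===== PORT B =====
-- port of B: build the result from scratch; kept = rules with truthy "apply"; keep the item
-- (with kept substituted for its "rules" value) iff kept is non-empty.
def filter_dfw_alt (dfw : List (String × List (String × List (String × List (String × Bool))))) : List (String × List (String × List (String × List (String × Bool)))) :=
  dfw.foldl (fun result nameItem =>
    let item := nameItem.2
    let kept := ((pyLookup? item "rules").getD []).filter
      (fun rp => (pyLookup? rp.2 "apply").getD false)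
    if kept.isEmpty then result
    else result ++ [(nameItem.1, item.map (fun kv => if kv.1 = "rules" then (kv.1, kept) else kv))]) []

-- ===== PRECONDITION & SPEC =====
-- Pre_ excludes inputs on which Python A raises KeyError (an item without a "rules" key, or a rule
-- under "rules" without an "apply" key), and inputs whose association lists carry duplicate keys at
-- some dict level — a Python dict cannot hold duplicates, so such lists denote no dict input.
def Pre_filter_dfw (dfw : List (String × List (String × List (String × List (String × Bool))))) : Prop :=
  (dfw.map Prod.fst).Nodup ∧
  ∀ p ∈ dfw, (p.2.map Prod.fst).Nodup ∧
    (∀ q ∈ p.2, (q.2.map Prod.fst).Nodup ∧ ∀ r ∈ q.2, (r.2.map Prod.fst).Nodup) ∧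
    ∃ q ∈ p.2, q.1 = "rules" ∧ ∀ r ∈ q.2, "apply" ∈ r.2.map Prod.fst
instance (dfw : List (String × List (String × List (String × List (String × Bool))))) : Decidable (Pre_filter_dfw dfw) := by unfold Pre_filter_dfw; infer_instance

def pvWitness_filter_dfw : (List (String × List (String × List (String × List (String × Bool))))) :=
  [("i1", [("rules", [("r1", [("apply", true)]), ("r2", [("apply", false)])]), ("extra", [])]),
   ("i2", [("rules", [("r1", [("apply", false)])])])]

def Spec_filter_dfw (dfw : List (String × List (String × List (String × List (String × Bool))))) (out : List (String × List (String × List (String × List (String × Bool))))) : Prop := out = filter_dfw_alt dfw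
instance (dfw : List (String × List (String × List (String × List (String × Bool))))) (out : List (String × List (String × List (String × List (String × Bool))))) : Decidable (Spec_filter_dfw dfw out) := by
  unfold Spec_filter_dfw
  letI : DecidableEq (List (String × List (String × Bool))) := inferInstance
  letI : DecidableEq (List (String × List (String × List (String × Bool)))) := inferInstance
  letI : DecidableEq (List (String × List (String × List (String × List (String × Bool))))) := inferInstance
  infer_instance

-- ===== CLAIM (what is proved, stated in full; the proofs are below) =====
def Claim_equal_filter_dfw : Prop := ∀ (dfw : List (String × List (String × List (String × List (String × Bool))))), Dom_filter_dfw dfw → Pre_filter_dfw dfw → Spec_filter_dfw dfw (filter_dfw dfw)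


-- ===== LEMMAS AND PROOFS =====

-- B's per-item action: the kept entry (if any) produced for one (name, item) pair.
def pvKeep (x : String × List (String × List (String × List (String × Bool)))) :
    Option (String × List (String × List (String × List (String × Bool)))) :=
  let kept := ((pyLookup? x.2 "rules").getD []).filter (fun rp => (pyLookup? rp.2 "apply").getD false)
  if kept.isEmpty then none
  else some (x.1, x.2.map (fun kv => if kv.1 = "rules" then (kv.1, kept) else kv))

-- ---- generic association-list lemmas ----
theorem pyLookup?_cons {b : Type} (x : String × b) (t : List (String × b)) (k : String) :
    pyLookup? (x :: t) k = if x.1 = k then some x.2 else pyLookup? t k := rfl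

theorem pyLookup?_append {b : Type} (P L : List (String × b)) (k : String)
    (h : ∀ p ∈ P, p.1 ≠ k) : pyLookup? (P ++ L) k = pyLookup? L k := by
  induction P with
  | nil => rfl
  | cons x t ih =>
    simp only [List.cons_append, pyLookup?_cons]
    rw [if_neg (h x (List.mem_cons_self))]
    exact ih (fun p hp => h p (List.mem_cons_of_mem _ hp))

theorem pyLookup?_mem {b : Type} (d : List (String × b)) (k : String) (v : b)
    (hnd : (d.map Prod.fst).Nodup) (hm : (k, v) ∈ d) : pyLookup? d k = some v := by
  induction d with
  | nil => cases hm
  | cons x t ih =>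
    simp only [List.map_cons, List.nodup_cons] at hnd
    rcases List.mem_cons.1 hm with h | h
    · subst h; simp [pyLookup?_cons]
    · rw [pyLookup?_cons, if_neg, ih hnd.2 h]
      intro hx
      exact hnd.1 (hx ▸ (List.mem_map_of_mem h : (k, v).1 ∈ t.map Prod.fst))

theorem pyDelKey_cons {b : Type} (x : String × b) (t : List (String × b)) (k : String) :
    pyDelKey (x :: t) k = if x.1 = k then t else x :: pyDelKey t k := rfl

theorem pyDelKey_append {b : Type} (P L : List (String × b)) (k : String)
    (h : ∀ p ∈ P, p.1 ≠ k) : pyDelKey (P ++ L) k = P ++ pyDelKey L k := by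
  induction P with
  | nil => rfl
  | cons x t ih =>
    simp only [List.cons_append, pyDelKey_cons]
    rw [if_neg (h x (List.mem_cons_self)), ih (fun p hp => h p (List.mem_cons_of_mem _ hp))]

theorem pyDelKey_eq_filter {b : Type} (d : List (String × b)) (k : String)
    (hnd : (d.map Prod.fst).Nodup) :
    pyDelKey d k = d.filter (fun e => decide (e.1 ≠ k)) := by
  induction d with
  | nil => rfl
  | cons x t ih =>
    simp only [List.map_cons, List.nodup_cons] at hnd
    by_cases hx : x.1 = k
    · rw [pyDelKey_cons, if_pos hx, List.filter_cons_of_neg (by simp [hx])]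
      refine (List.filter_eq_self.2 ?_).symm
      intro e he
      simp only [decide_eq_true_eq]
      intro hek
      exact hnd.1 (hx ▸ hek ▸ List.mem_map_of_mem he)
    · rw [pyDelKey_cons, if_neg hx, List.filter_cons_of_pos (by simp [hx]), ih hnd.2]

theorem pyModKey_congr {b : Type} (d : List (String × b)) (k : String) (f g : b → b)
    (h : ∀ p ∈ d, p.1 = k → f p.2 = g p.2) : pyModKey d k f = pyModKey d k g := by
  unfold pyModKey
  refine List.map_congr_left (fun p hp => ?_)
  by_cases hk : p.1 = k
  · rw [if_pos hk, if_pos hk, h p hp hk]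
  · rw [if_neg hk, if_neg hk]

theorem pyModKey_eq_self {b : Type} (d : List (String × b)) (k : String) (f : b → b)
    (h : ∀ p ∈ d, p.1 ≠ k) : pyModKey d k f = d := by
  unfold pyModKey
  refine List.map_congr_left (fun p hp => ?_) |>.trans (List.map_id _)
  simp [h p hp]

theorem pyModKey_mid {b : Type} (P R : List (String × b)) (k : String) (v : b) (f : b → b)
    (hP : ∀ p ∈ P, p.1 ≠ k) (hR : ∀ p ∈ R, p.1 ≠ k) :
    pyModKey (P ++ (k, v) :: R) k f = P ++ (k, f v) :: R := by
  unfold pyModKey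
  rw [List.map_append, List.map_cons]
  rw [show (List.map (fun p => if p.1 = k then (p.1, f p.2) else p) P) = pyModKey P k f from rfl,
      show (List.map (fun p => if p.1 = k then (p.1, f p.2) else p) R) = pyModKey R k f from rfl,
      pyModKey_eq_self P k f hP, pyModKey_eq_self R k f hR]
  simp

theorem pyModKey_modKey {b : Type} (d : List (String × b)) (k : String) (f g : b → b) :
    pyModKey (pyModKey d k f) k g = pyModKey d k (fun x => g (f x)) := by
  unfold pyModKey
  rw [List.map_map]
  refine List.map_congr_left (fun p _ => ?_)
  by_cases hk : p.1 = k <;> simp [hk]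

theorem pyModKey_id {b : Type} (d : List (String × b)) (k : String) :
    pyModKey d k (fun x => x) = d := by
  unfold pyModKey
  refine (List.map_congr_left (fun p _ => ?_)).trans (List.map_id _)
  obtain ⟨p1, p2⟩ := p
  by_cases hk : p1 = k <;> simp [hk]

theorem pyLookup?_modKey_self {b : Type} (d : List (String × b)) (k : String) (f : b → b) :
    pyLookup? (pyModKey d k f) k = (pyLookup? d k).map f := by
  induction d with
  | nil => rfl
  | cons x t ih =>
    by_cases hk : x.1 = k
    · simp [pyModKey, pyLookup?_cons, hk]
    · simpa [pyModKey, pyLookup?_cons, hk] using ih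

-- ---- loop-shape lemmas for A's inner deletion loop ----
theorem foldl_modKey_mid {a b : Type} (rl : List a) (c : a → Prop) [DecidablePred c]
    (f : a → b → b) (k : String) (P R : List (String × b)) (v : b)
    (hP : ∀ p ∈ P, p.1 ≠ k) (hR : ∀ p ∈ R, p.1 ≠ k) :
    rl.foldl (fun D rp => if c rp then pyModKey D k (f rp) else D) (P ++ (k, v) :: R)
      = P ++ (k, rl.foldl (fun w rp => if c rp then f rp w else w) v) :: R := by
  induction rl generalizing v with
  | nil => rfl
  | cons x t ih =>
    by_cases hx : c x
    · simp only [List.foldl_cons, if_pos hx, pyModKey_mid P R k v (f x) hP hR]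
      exact ih (f x v)
    · simp only [List.foldl_cons, if_neg hx]
      exact ih v

theorem foldl_modKey_factor {a b : Type} (rl : List a) (c : a → Prop) [DecidablePred c]
    (g : a → b → b) (kk : String) (v : List (String × b)) :
    rl.foldl (fun w rp => if c rp then pyModKey w kk (g rp) else w) v
      = pyModKey v kk (fun x => rl.foldl (fun x rp => if c rp then g rp x else x) x) := by
  induction rl generalizing v with
  | nil => exact (pyModKey_id v kk).symm
  | cons x t ih =>
    by_cases hx : c x
    · simp only [List.foldl_cons, if_pos hx]
      rw [ih, pyModKey_modKey]
    · simp only [List.foldl_cons, if_neg hx]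
      rw [ih]

theorem foldl_delKey_eq_filter {a b : Type} (c : a → Prop) [DecidablePred c] (key : a → String)
    (rl : List a) (d : List (String × b)) (hnd : (d.map Prod.fst).Nodup) :
    rl.foldl (fun r rp => if c rp then pyDelKey r (key rp) else r) d
      = d.filter (fun e => decide (∀ rp ∈ rl, c rp → key rp ≠ e.1)) := by
  induction rl generalizing d with
  | nil => simp
  | cons x t ih =>
    by_cases hx : c x
    · rw [List.foldl_cons, if_pos hx, pyDelKey_eq_filter d (key x) hnd,
        ih _ (List.Nodup.sublist (List.Sublist.map Prod.fst List.filter_sublist) hnd),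
        List.filter_filter]
      refine List.filter_congr (fun e _ => ?_)
      rw [← Bool.decide_and, decide_eq_decide]
      constructor
      · rintro ⟨h1, h2⟩ rp hrp hc
        rcases List.mem_cons.1 hrp with rfl | hm
        · exact fun he => h2 he.symm
        · exact h1 rp hm hc
      · intro h
        exact ⟨fun rp hm hc => h rp (List.mem_cons_of_mem _ hm) hc,
               fun he => h x List.mem_cons_self hx he.symm⟩
    · rw [List.foldl_cons, if_neg hx, ih _ hnd]
      refine List.filter_congr (fun e _ => ?_)
      simp only [decide_eq_decide, List.mem_cons]
      constructor
      · rintro h rp (rfl | hrp)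
        · exact fun hc => absurd hc hx
        · exact h rp hrp
      · intro h rp hrp
        exact h rp (Or.inr hrp)

-- A's inner deletion loop over rv (keys Nodup) leaves exactly the rules with a truthy "apply".
theorem foldl_delKey_rules (rv : List (String × List (String × Bool)))
    (hnd : (rv.map Prod.fst).Nodup) :
    rv.foldl (fun r rp => if ((pyLookup? rp.2 "apply").getD false) = false
        then pyDelKey r rp.1 else r) rv
      = rv.filter (fun rp => (pyLookup? rp.2 "apply").getD false) := by
  rw [foldl_delKey_eq_filter (fun rp => ((pyLookup? rp.2 "apply").getD false) = false)
    Prod.fst rv rv hnd]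
  refine List.filter_congr (fun e he => ?_)
  by_cases ha : (pyLookup? e.2 "apply").getD false
  · simp only [ha, decide_eq_true_eq]
    intro rp hrp hc hkey
    have h1 : pyLookup? rv rp.1 = some rp.2 := pyLookup?_mem rv rp.1 rp.2 hnd (by
      cases rp; exact hrp)
    have h2 : pyLookup? rv e.1 = some e.2 := pyLookup?_mem rv e.1 e.2 hnd (by
      cases e; exact he)
    rw [hkey, h2] at h1
    rw [← Option.some_inj.1 h1] at hc
    rw [ha] at hc
    cases hc
  · simp only [Bool.not_eq_true] at ha
    simp only [ha, decide_eq_false_iff_not, Classical.not_forall]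
    refine ⟨e, he, ha, ?_⟩
    simp

-- one step of A's outer loop, on an accumulator split around the current item
theorem stepA_mid (dfw P R : List (String × List (String × List (String × List (String × Bool)))))
    (k : String) (v : List (String × List (String × List (String × Bool))))
    (hmem : (k, v) ∈ dfw) (hdnd : (dfw.map Prod.fst).Nodup)
    (hv : (v.map Prod.fst).Nodup)
    (hq : ∀ q ∈ v, (q.2.map Prod.fst).Nodup)
    (hP : ∀ p ∈ P, p.1 ≠ k) (hR : ∀ p ∈ R, p.1 ≠ k)
    (rv : List (String × List (String × Bool))) (hrvmem : ("rules", rv) ∈ v) :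
    (fun DFW itemP =>
      let item := itemP.1
      let itemVal := (pyLookup? dfw item).getD []
      let rules := (pyLookup? itemVal "rules").getD []
      let DFW1 := rules.foldl (fun D ruleP =>
        let rule := ruleP.1
        let ruleVal := (pyLookup? rules rule).getD []
        if ((pyLookup? ruleVal "apply").getD false) = false
        then pyModKey D item (fun iv => pyModKey iv "rules" (fun r => pyDelKey r rule))
        else D) DFW
      if ((pyLookup? ((pyLookup? DFW1 item).getD []) "rules").getD []) = []
      then pyDelKey DFW1 item
      else DFW1) (P ++ (k, v) :: R) (k, v)
      = P ++ (pvKeep (k, v)).toList ++ R := by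
  have hlook : pyLookup? dfw k = some v := pyLookup?_mem dfw k v hdnd hmem
  have hlookr : pyLookup? v "rules" = some rv := pyLookup?_mem v "rules" rv hv hrvmem
  have hrvnd : (rv.map Prod.fst).Nodup := hq ("rules", rv) hrvmem
  simp only [hlook, Option.getD_some, hlookr]
  rw [PySem.List.foldl_congr_mem rv _
    (fun D rp => if ((pyLookup? rp.2 "apply").getD false) = false
      then pyModKey D k (fun iv => pyModKey iv "rules" (fun r => pyDelKey r rp.1)) else D) _
    (fun acc x hx => by
      obtain ⟨x1, x2⟩ := x
      rw [pyLookup?_mem rv x1 x2 hrvnd hx, Option.getD_some])]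
  rw [foldl_modKey_mid rv (fun rp => ((pyLookup? rp.2 "apply").getD false) = false)
    (fun rp => fun iv => pyModKey iv "rules" (fun r => pyDelKey r rp.1)) k P R v hP hR]
  rw [foldl_modKey_factor rv (fun rp => ((pyLookup? rp.2 "apply").getD false) = false)
    (fun rp => fun r => pyDelKey r rp.1) "rules" v]
  rw [pyLookup?_append P _ k hP, pyLookup?_cons, if_pos rfl, Option.getD_some,
    pyLookup?_modKey_self, hlookr, Option.map_some, Option.getD_some, foldl_delKey_rules rv hrvnd]
  by_cases hk : rv.filter (fun rp => (pyLookup? rp.2 "apply").getD false) = []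
  · rw [if_pos hk, pyDelKey_append P _ k hP, pyDelKey_cons, if_pos rfl]
    unfold pvKeep
    simp [hlookr, hk]
  · rw [if_neg hk]
    unfold pvKeep
    simp only [hlookr, Option.getD_some, List.isEmpty_iff]
    rw [if_neg hk]
    simp only [Option.toList_some]
    rw [pyModKey_congr v "rules"
      (fun x => rv.foldl (fun x rp => if ((pyLookup? rp.2 "apply").getD false) = false
        then pyDelKey x rp.1 else x) x)
      (fun _ => rv.filter (fun rp => (pyLookup? rp.2 "apply").getD false))
      (fun p hp hpk => by
        have h1 : pyLookup? v p.1 = some p.2 := pyLookup?_mem v p.1 p.2 hv (by cases p; exact hp)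
        rw [hpk, hlookr] at h1
        rw [(Option.some_inj.1 h1).symm]
        exact foldl_delKey_rules rv hrvnd)]
    simp [pyModKey]

theorem pvKeep_none_or (x : String × List (String × List (String × List (String × Bool)))) :
    pvKeep x = none ∨ ∃ w, pvKeep x = some (x.1, w) := by
  unfold pvKeep
  by_cases h : (((pyLookup? x.2 "rules").getD []).filter
      (fun rp => (pyLookup? rp.2 "apply").getD false)).isEmpty
  · left; simp [h]
  · right
    exact ⟨x.2.map (fun kv => if kv.1 = "rules"
      then (kv.1, ((pyLookup? x.2 "rules").getD []).filter
        (fun rp => (pyLookup? rp.2 "apply").getD false)) else kv), by simp [h]⟩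

-- A's whole outer loop, by induction over the unprocessed suffix of the accumulator
theorem foldA_outer (dfw : List (String × List (String × List (String × List (String × Bool)))))
    (hdnd : (dfw.map Prod.fst).Nodup)
    (hitems : ∀ p ∈ dfw, (p.2.map Prod.fst).Nodup ∧
      (∀ q ∈ p.2, (q.2.map Prod.fst).Nodup ∧ ∀ r ∈ q.2, (r.2.map Prod.fst).Nodup) ∧
      ∃ q ∈ p.2, q.1 = "rules" ∧ ∀ r ∈ q.2, "apply" ∈ r.2.map Prod.fst) :
    ∀ (todo P : List (String × List (String × List (String × List (String × Bool))))),
    (∀ x ∈ todo, x ∈ dfw) → ((P ++ todo).map Prod.fst).Nodup →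
    todo.foldl (fun DFW itemP =>
      let item := itemP.1
      let itemVal := (pyLookup? dfw item).getD []
      let rules := (pyLookup? itemVal "rules").getD []
      let DFW1 := rules.foldl (fun D ruleP =>
        let rule := ruleP.1
        let ruleVal := (pyLookup? rules rule).getD []
        if ((pyLookup? ruleVal "apply").getD false) = false
        then pyModKey D item (fun iv => pyModKey iv "rules" (fun r => pyDelKey r rule))
        else D) DFW
      if ((pyLookup? ((pyLookup? DFW1 item).getD []) "rules").getD []) = []
      then pyDelKey DFW1 item
      else DFW1) (P ++ todo) = P ++ todo.filterMap pvKeep := by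
  intro todo
  induction todo with
  | nil => intro P _ _; simp
  | cons x t ih =>
    intro P hmem hnd
    obtain ⟨k, v⟩ := x
    have hx : (k, v) ∈ dfw := hmem (k, v) List.mem_cons_self
    obtain ⟨hv, hq, q, hqmem, hq1, _⟩ := hitems (k, v) hx
    obtain ⟨q1, rv⟩ := q
    simp only at hq1
    subst hq1
    have hnd' := hnd
    rw [List.map_append, List.map_cons] at hnd'
    obtain ⟨ndP, ndxt, disj⟩ := List.nodup_append.1 hnd'
    have hPk : ∀ p ∈ P, p.1 ≠ k := fun p hp =>
      disj p.1 (List.mem_map_of_mem hp) k List.mem_cons_self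
    have hTk : ∀ p ∈ t, p.1 ≠ k := fun p hp he => by
      rw [List.nodup_cons] at ndxt
      have hmm : p.1 ∈ t.map Prod.fst := List.mem_map_of_mem hp
      rw [he] at hmm
      exact ndxt.1 hmm
    rw [List.foldl_cons]
    have hstep := stepA_mid dfw P t k v hx hdnd hv (fun q hq2 => (hq q hq2).1) hPk hTk rv hqmem
    simp only [] at hstep
    rw [hstep]
    rcases pvKeep_none_or (k, v) with hn | ⟨w, hs⟩
    · rw [hn]
      simp only [Option.toList_none, List.append_nil, List.filterMap_cons, hn]
      exact ih P (fun y hy => hmem y (List.mem_cons_of_mem _ hy))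
        (by
          refine List.Nodup.sublist (List.Sublist.map Prod.fst ?_) hnd
          exact List.Sublist.append_left (List.sublist_cons_self _ _) P)
    · rw [hs]
      simp only [Option.toList_some, List.filterMap_cons, hs]
      rw [show P ++ [(k, w)] ++ t = (P ++ [(k, w)]) ++ t from by simp]
      rw [ih (P ++ [(k, w)]) (fun y hy => hmem y (List.mem_cons_of_mem _ hy))
        (by simpa [List.map_append] using hnd')]
      simp

-- one step of B's loop appends the kept entry (if any)
theorem stepB_eq (acc : List (String × List (String × List (String × List (String × Bool)))))
    (x : String × List (String × List (String × List (String × Bool)))) :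
    (fun result nameItem =>
      let item := nameItem.2
      let kept := ((pyLookup? item "rules").getD []).filter
        (fun rp => (pyLookup? rp.2 "apply").getD false)
      if kept.isEmpty then result
      else result ++ [(nameItem.1, item.map (fun kv => if kv.1 = "rules" then (kv.1, kept) else kv))])
      acc x = acc ++ (pvKeep x).toList := by
  unfold pvKeep
  by_cases h : (((pyLookup? x.2 "rules").getD []).filter
      (fun rp => (pyLookup? rp.2 "apply").getD false)).isEmpty
  · simp [h]
  · simp [h]

theorem foldB_append (l : List (String × List (String × List (String × List (String × Bool)))))
    (acc : List (String × List (String × List (String × List (String × Bool))))) :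
    l.foldl (fun result nameItem =>
      let item := nameItem.2
      let kept := ((pyLookup? item "rules").getD []).filter
        (fun rp => (pyLookup? rp.2 "apply").getD false)
      if kept.isEmpty then result
      else result ++ [(nameItem.1, item.map (fun kv => if kv.1 = "rules" then (kv.1, kept) else kv))])
      acc = acc ++ l.filterMap pvKeep := by
  induction l generalizing acc with
  | nil => simp
  | cons x t ih =>
    rw [List.foldl_cons]
    have hstep := stepB_eq acc x
    simp only [] at hstep
    rw [hstep, ih]
    cases hpv : pvKeep x <;> simp [hpv]

-- ===== VERDICT (by name: the statement is the Claim_ definition above) =====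
theorem filter_dfw_spec : Claim_equal_filter_dfw := by
  intro dfw _ hpre
  obtain ⟨hdnd, hitems⟩ := hpre
  unfold Spec_filter_dfw
  have hA : filter_dfw dfw = dfw.filterMap pvKeep := by
    unfold filter_dfw
    have h := foldA_outer dfw hdnd hitems dfw [] (fun x hx => hx) (by simpa using hdnd)
    simpa using h
  have hB : filter_dfw_alt dfw = dfw.filterMap pvKeep := by
    unfold filter_dfw_alt
    simpa using foldB_append dfw []
  rw [hA, hB]
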